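-- pv_equiv track=rewrite | github.com/idptools/finches | finches/data/forcefeild_dependencies.py | _GS_length_generator
-- ===== SOURCE A (Python) =====
-- def _GS_length_generator(N, start_AA="G"):
--     """
--     Takes in a number and generates "GS" string of the certain length
--
--     Parameters
--     ---------------
--     N : int
--         int that defines the length of the returned polyGS sequence
--
--     start_AA : str ['G', 'S']
--         flag to note wheather to build the sequence starting with Gly or Ser
--
--     Returns
--     ---------------
--     GS_string : str
--         sequence of polyGS
--
--     """
--     AA_choices = {"G":["G","S"] , "S":["S","G"]}[start_AA]
--     seq=[]
--     c=0
--     while c < N: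
--         for i in AA_choices:
--             seq.append(i)
--             c+=1
--     #if N is odd
--     if N % 2 != 0:
--         seq= seq[:-1]
--
--     if len(seq)!= N:
--         return 0
--
--     return ''.join(seq)
-- ===== SOURCE B (Python) =====
-- def _GS_length_generator(N, start_AA="G"):
--     base = {"G": "GS", "S": "SG"}[start_AA]
--     return (base * ((N + 1) // 2))[:N]
-- ===== Notes on version B (the rewrite author's own statement) =====
-- stated objective: simpler
-- what changed: Replaces the while/for append loop, odd-length trim and length sanity check by a closed form: repeat the 2-char base pattern ceil(N/2) times and slice to length N.
-- outside the precondition, e.g. on _GS_length_generator(-1, 'G'): A returns 0, B returns ''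
import Mathlib
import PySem

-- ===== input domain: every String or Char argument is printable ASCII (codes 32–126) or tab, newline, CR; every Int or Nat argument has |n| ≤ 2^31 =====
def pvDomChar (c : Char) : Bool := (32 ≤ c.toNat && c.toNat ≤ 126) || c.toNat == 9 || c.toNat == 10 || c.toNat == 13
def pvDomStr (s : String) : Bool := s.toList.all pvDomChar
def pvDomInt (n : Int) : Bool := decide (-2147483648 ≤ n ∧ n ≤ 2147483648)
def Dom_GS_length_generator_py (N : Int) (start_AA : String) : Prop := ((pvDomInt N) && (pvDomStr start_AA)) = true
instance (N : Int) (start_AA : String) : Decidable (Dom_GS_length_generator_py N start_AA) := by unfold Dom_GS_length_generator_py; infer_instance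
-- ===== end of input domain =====

-- B replaces A's while/for append loop, odd-length trim and length check by a closed form
-- (repeat the two-char base pattern ceil(N/2) times and slice to length N); objective: simpler.


-- ===== PORT A =====
-- the 'while c < N: for i in AA_choices: seq.append(i); c += 1' loop; AA_choices is always
-- a two-element list, so each while iteration appends both chars and advances c by 2
def gsWhileLoop (N : Int) (a b : Char) (seq : List Char) (c : Int) : List Char :=
  if c < N then gsWhileLoop N a b (seq ++ [a, b]) (c + 2) else seq
termination_by (N - c).toNat
decreasing_by omega

def GS_length_generator_py (N : Int) (start_AA : String) : String :=
  -- dict lookup {"G":["G","S"],"S":["S","G"]}[start_AA]; KeyError on other keys is outside Pre_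
  let AA_choices : List Char := if start_AA = "S" then ['S', 'G'] else ['G', 'S']
  let seq := gsWhileLoop N (AA_choices.headD 'G') (AA_choices.getLastD 'S') [] 0
  let seq := if PySem.Int.mod N 2 ≠ 0 then PySem.List.slice seq none (some (-1)) else seq
  -- 'if len(seq) != N: return 0' returns an int, not a str; those inputs (N < 0) are outside Pre_
  if (seq.length : Int) ≠ N then "" else String.ofList seq

-- ===== PORT B =====
def GS_length_generator_py_alt (N : Int) (start_AA : String) : String :=
  let base : List Char := if start_AA = "S" then ['S', 'G'] else ['G', 'S']
  -- (base * ((N + 1) // 2))[:N]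
  String.ofList (PySem.List.slice ((List.replicate (PySem.Int.floordiv (N + 1) 2).toNat base).flatten)
    none (some N))

-- ===== PRECONDITION & SPEC =====
-- Pre_ excludes start_AA outside {"G","S"} (A raises KeyError) and N < 0 (A returns the int 0,
-- not a value of the declared string type).
def Pre_GS_length_generator_py (N : Int) (start_AA : String) : Prop :=
  0 ≤ N ∧ (start_AA = "G" ∨ start_AA = "S")
instance (N : Int) (start_AA : String) : Decidable (Pre_GS_length_generator_py N start_AA) := by
  unfold Pre_GS_length_generator_py; infer_instance

def pvWitness_GS_length_generator_py : Int × String := (5, "G")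

def Spec_GS_length_generator_py (N : Int) (start_AA : String) (out : String) : Prop := out = GS_length_generator_py_alt N start_AA
instance (N : Int) (start_AA : String) (out : String) : Decidable (Spec_GS_length_generator_py N start_AA out) := by unfold Spec_GS_length_generator_py; infer_instance

-- ===== CLAIM (what is proved, stated in full; the proofs are below) =====
def Claim_equal_GS_length_generator_py : Prop := ∀ (N : Int) (start_AA : String), Dom_GS_length_generator_py N start_AA → Pre_GS_length_generator_py N start_AA → Spec_GS_length_generator_py N start_AA (GS_length_generator_py N start_AA)

-- ===== LEMMAS AND PROOFS =====

-- the while loop appends ceil((N-c)/2) copies of [a,b]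
theorem gsWhileLoop_eq (N : Int) (a b : Char) :
    ∀ (fuel : Nat) (seq : List Char) (c : Int), (N - c).toNat = fuel →
      gsWhileLoop N a b seq c =
        seq ++ (List.replicate (((N - c).toNat + 1) / 2) [a, b]).flatten := by
  intro fuel
  induction fuel using Nat.strong_induction_on with
  | _ fuel ih =>
    intro seq c hf
    rw [gsWhileLoop]
    split
    · next h =>
      rw [ih ((N - (c + 2)).toNat) (by omega) _ _ rfl, List.append_assoc]
      congr 1
      have h2 : ((N - c).toNat + 1) / 2 = ((N - (c + 2)).toNat + 1) / 2 + 1 := by omega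
      rw [h2, List.replicate_succ, List.flatten_cons]
    · next h =>
      have : ((N - c).toNat + 1) / 2 = 0 := by omega
      simp [this]

-- core equality for a fixed two-char pattern, with N = ↑n ≥ 0
theorem GS_core (n : Nat) (a b : Char) :
    (let seq := gsWhileLoop (n : Int) a b [] 0
     let seq := if PySem.Int.mod (n : Int) 2 ≠ 0 then PySem.List.slice seq none (some (-1)) else seq
     if (seq.length : Int) ≠ (n : Int) then "" else String.ofList seq)
    = String.ofList (PySem.List.slice
        ((List.replicate (PySem.Int.floordiv ((n : Int) + 1) 2).toNat [a, b]).flatten)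
        none (some (n : Int))) := by
  have hloop : gsWhileLoop (n : Int) a b [] 0 = (List.replicate ((n + 1) / 2) [a, b]).flatten := by
    have h := gsWhileLoop_eq (n : Int) a b (((n : Int) - 0).toNat) [] 0 rfl
    simpa using h
  have hfd : (PySem.Int.floordiv ((n : Int) + 1) 2).toNat = (n + 1) / 2 := by
    rw [PySem.Int.floordiv_eq_ediv_of_pos (by norm_num)]; omega
  have hmod : PySem.Int.mod (n : Int) 2 = (n : Int) % 2 :=
    PySem.Int.mod_eq_emod_of_pos (by norm_num)
  have hlen : ((List.replicate ((n + 1) / 2) [a, b]).flatten).length = 2 * ((n + 1) / 2) := by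
    simp [mul_comm]
  simp only [hloop, hmod, hfd, PySem.List.slice_to_natCast]
  by_cases hpar : n % 2 = 0
  · have hc : ¬ ((n : Int) % 2 ≠ 0) := by omega
    rw [if_neg hc]
    have hn2 : 2 * ((n + 1) / 2) = n := by omega
    rw [if_neg (by rw [hlen, hn2]; simp)]
    rw [List.take_of_length_le (by omega)]
  · have hc : ((n : Int) % 2 ≠ 0) := by omega
    rw [if_pos hc, PySem.List.slice_to_neg_one]
    have hn2 : 2 * ((n + 1) / 2) = n + 1 := by omega
    rw [if_neg (by simp [hlen, hn2])]
    rw [List.dropLast_eq_take, hlen, hn2]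
    simp

-- ===== VERDICT (by name: the statement is the Claim_ definition above) =====
theorem GS_length_generator_py_spec : Claim_equal_GS_length_generator_py := by
  intro N sa _ ⟨hN, hsa⟩
  obtain ⟨n, rfl⟩ := Int.eq_ofNat_of_zero_le hN
  unfold Spec_GS_length_generator_py
  rcases hsa with rfl | rfl <;>
    simpa [GS_length_generator_py, GS_length_generator_py_alt,
      ] using GS_core n _ _
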